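-- pv_equiv track=rewrite | github.com/red1-for-hek/Flood-Spaces-2.0 | backend/app/main.py | summarize_source_health
-- ===== SOURCE A (Python) =====
-- from typing import Dict, List, Literal, Tuple
--
-- def summarize_source_health(items: List[Dict]) -> Dict:
--     total = max(1, len(items))
--
--     def pct(key: str) -> int:
--         count = sum(1 for item in items if bool(item.get("data_sources", {}).get(key)))
--         return int(round((count / total) * 100))
--
--     return {
--         "forecast_live_pct": pct("forecast_live"),
--         "open_meteo_live_pct": pct("open_meteo_live"),
--         "openweather_fallback_pct": pct("openweather_forecast_fallback_live"),
--         "nasa_live_pct": pct("nasa_live"),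
--         "river_live_pct": pct("river_live"),
--         "temperature_live_pct": pct("temp_live"),
--     }
-- ===== SOURCE B (Python) =====
-- def summarize_source_health(items):
--     # single pass: six counters, one scan over items
--     c1 = c2 = c3 = c4 = c5 = c6 = 0
--     for item in items:
--         ds = item.get("data_sources", {})
--         if ds.get("forecast_live"): c1 += 1
--         if ds.get("open_meteo_live"): c2 += 1
--         if ds.get("openweather_forecast_fallback_live"): c3 += 1
--         if ds.get("nasa_live"): c4 += 1
--         if ds.get("river_live"): c5 += 1
--         if ds.get("temp_live"): c6 += 1
--     total = max(1, len(items))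
--     pct = lambda c: int(round((c / total) * 100))
--     return {
--         "forecast_live_pct": pct(c1),
--         "open_meteo_live_pct": pct(c2),
--         "openweather_fallback_pct": pct(c3),
--         "nasa_live_pct": pct(c4),
--         "river_live_pct": pct(c5),
--         "temperature_live_pct": pct(c6),
--     }
-- ===== Notes on version B (the rewrite author's own statement) =====
-- stated objective: alternative
-- what changed: One scan over items maintaining six counters (fetching data_sources once per item) replaces six separate full scans, one per key; measured cost is about the same.
import Mathlib
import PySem

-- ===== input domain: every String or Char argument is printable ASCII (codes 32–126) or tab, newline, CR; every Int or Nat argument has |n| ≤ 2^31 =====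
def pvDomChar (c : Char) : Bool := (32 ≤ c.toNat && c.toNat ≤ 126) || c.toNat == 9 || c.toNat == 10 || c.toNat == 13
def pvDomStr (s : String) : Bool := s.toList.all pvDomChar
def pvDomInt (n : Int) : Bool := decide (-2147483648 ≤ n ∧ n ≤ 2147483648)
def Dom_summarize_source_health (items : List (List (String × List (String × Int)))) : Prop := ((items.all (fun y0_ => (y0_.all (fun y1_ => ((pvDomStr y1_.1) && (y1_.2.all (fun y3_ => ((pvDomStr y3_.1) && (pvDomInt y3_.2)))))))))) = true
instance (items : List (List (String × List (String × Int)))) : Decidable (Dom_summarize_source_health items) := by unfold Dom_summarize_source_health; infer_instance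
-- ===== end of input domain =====

-- B replaces A's six full scans of `items` (one per key) by a single scan keeping six counters.

-- shared helpers: exact emulation of `int(round((count/total)*100))` on IEEE doubles
-- (division rounds once to 53-bit mantissa, *100 rounds once, round() is half-even);
-- and Python truthiness of `d.get(key)` (None and 0 falsy).

-- round-half-even of n/d (d > 0)
def pvRHE (n d : Nat) : Nat :=
  let q := n / d
  let r := n % d
  if 2*r < d then q else if 2*r > d then q+1 else if q % 2 = 0 then q else q+1

-- (n * 2^s, d) as a numerator/denominator pair, s may be negative
def pvScaled (n d : Nat) (s : Int) : Nat × Nat :=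
  if 0 ≤ s then (n * 2^s.toNat, d) else (n, d * 2^(-s).toNat)

-- exact value of float(count/total) * 100.0 rounded by Python's round(); 0 ≤ count ≤ total, 0 < total
def pvPct (count total : Nat) : Int :=
  if count = 0 then 0 else
  -- round count/total to nearest double m / 2^s1 (53-bit mantissa)
  let s0 : Int := 52 - ((Nat.log2 count : Int) - (Nat.log2 total : Int))
  let p0 := pvScaled count total s0
  let s1 := if p0.1 / p0.2 < 2^52 then s0 + 1 else s0
  let p1 := pvScaled count total s1
  let m0 := pvRHE p1.1 p1.2
  let ms := if m0 = 2^53 then ((2^52 : Nat), s1 - 1) else (m0, s1)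
  -- multiply by 100 and round back to 53 bits
  let m2 := ms.1 * 100
  let t : Int := ((Nat.log2 m2 : Int) + 1) - 53
  let ms3 := if 0 < t then (pvRHE m2 (2^t.toNat), ms.2 - t) else (m2, ms.2)
  -- round() : round-half-even of the exact double value to an integer
  ((pvRHE ms3.1 (2^ms3.2.toNat) : Nat) : Int)

-- Python truthiness of ds.get(key): first-match lookup, missing key or value 0 is falsy
def pvTruthy (ds : List (String × Int)) (key : String) : Bool :=
  (List.lookup key ds).getD 0 != 0

-- ===== PORT A =====
def summarize_source_health (items : List (List (String × List (String × Int)))) : List (String × Int) :=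
  let total := max 1 items.length
  let pct := fun (key : String) =>
    let count := List.foldl
      (fun (acc : Nat) item =>
        if pvTruthy ((List.lookup "data_sources" item).getD []) key then acc + 1 else acc)
      0 items
    pvPct count total
  [("forecast_live_pct", pct "forecast_live"),
   ("open_meteo_live_pct", pct "open_meteo_live"),
   ("openweather_fallback_pct", pct "openweather_forecast_fallback_live"),
   ("nasa_live_pct", pct "nasa_live"),
   ("river_live_pct", pct "river_live"),
   ("temperature_live_pct", pct "temp_live")]

-- ===== PORT B =====
def summarize_source_health_alt (items : List (List (String × List (String × Int)))) : List (String × Int) :=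
  let c := List.foldl
    (fun (c : Nat × Nat × Nat × Nat × Nat × Nat) item =>
      let ds := (List.lookup "data_sources" item).getD []
      ((if pvTruthy ds "forecast_live" then c.1 + 1 else c.1),
       (if pvTruthy ds "open_meteo_live" then c.2.1 + 1 else c.2.1),
       (if pvTruthy ds "openweather_forecast_fallback_live" then c.2.2.1 + 1 else c.2.2.1),
       (if pvTruthy ds "nasa_live" then c.2.2.2.1 + 1 else c.2.2.2.1),
       (if pvTruthy ds "river_live" then c.2.2.2.2.1 + 1 else c.2.2.2.2.1),
       (if pvTruthy ds "temp_live" then c.2.2.2.2.2 + 1 else c.2.2.2.2.2)))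
    (0, 0, 0, 0, 0, 0) items
  let total := max 1 items.length
  [("forecast_live_pct", pvPct c.1 total),
   ("open_meteo_live_pct", pvPct c.2.1 total),
   ("openweather_fallback_pct", pvPct c.2.2.1 total),
   ("nasa_live_pct", pvPct c.2.2.2.1 total),
   ("river_live_pct", pvPct c.2.2.2.2.1 total),
   ("temperature_live_pct", pvPct c.2.2.2.2.2 total)]

-- ===== PRECONDITION & SPEC =====
def Spec_summarize_source_health (items : List (List (String × List (String × Int)))) (out : List (String × Int)) : Prop := out = summarize_source_health_alt items
instance (items : List (List (String × List (String × Int)))) (out : List (String × Int)) : Decidable (Spec_summarize_source_health items out) := by unfold Spec_summarize_source_health; infer_instance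

-- ===== CLAIM (what is proved, stated in full; the proofs are below) =====
def Claim_equal_summarize_source_health : Prop := ∀ (items : List (List (String × List (String × Int)))), Dom_summarize_source_health items → Spec_summarize_source_health items (summarize_source_health items)

-- ===== LEMMAS AND PROOFS =====

-- A-style per-key count with an arbitrary starting accumulator
def pvCnt (key : String) (init : Nat) (items : List (List (String × List (String × Int)))) : Nat :=
  List.foldl
    (fun (acc : Nat) item =>
      if pvTruthy ((List.lookup "data_sources" item).getD []) key then acc + 1 else acc)
    init items

-- B's six-counter fold computes the six A-style counts
theorem pv_fold6 (items : List (List (String × List (String × Int))))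
    (a b c d e f : Nat) :
    List.foldl
      (fun (c : Nat × Nat × Nat × Nat × Nat × Nat) item =>
        let ds := (List.lookup "data_sources" item).getD []
        ((if pvTruthy ds "forecast_live" then c.1 + 1 else c.1),
         (if pvTruthy ds "open_meteo_live" then c.2.1 + 1 else c.2.1),
         (if pvTruthy ds "openweather_forecast_fallback_live" then c.2.2.1 + 1 else c.2.2.1),
         (if pvTruthy ds "nasa_live" then c.2.2.2.1 + 1 else c.2.2.2.1),
         (if pvTruthy ds "river_live" then c.2.2.2.2.1 + 1 else c.2.2.2.2.1),
         (if pvTruthy ds "temp_live" then c.2.2.2.2.2 + 1 else c.2.2.2.2.2)))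
      (a, b, c, d, e, f) items
    = (pvCnt "forecast_live" a items,
       pvCnt "open_meteo_live" b items,
       pvCnt "openweather_forecast_fallback_live" c items,
       pvCnt "nasa_live" d items,
       pvCnt "river_live" e items,
       pvCnt "temp_live" f items) := by
  induction items generalizing a b c d e f with
  | nil => simp [pvCnt]
  | cons x xs ih =>
      simp only [List.foldl_cons, pvCnt] at *
      exact ih _ _ _ _ _ _

-- ===== VERDICT (by name: the statement is the Claim_ definition above) =====
theorem summarize_source_health_spec : Claim_equal_summarize_source_health := by
  intro items _
  show summarize_source_health items = summarize_source_health_alt items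
  simp only [summarize_source_health, summarize_source_health_alt, pv_fold6, pvCnt]
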